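-- pv_equiv track=rewrite | github.com/nicolmartinez18/Desarrollo-de-sofware | Logaritmo de Euclides.py | euclides
-- ===== SOURCE A (Python) =====
-- def euclides(num1, num2, resultado=1):
--     if num1 < num2:
--         num1, num2 = num2, num1
--     resto = num1 % num2
--     if resto == 0:
--         return (num2, resultado)
--     else:
--         return euclides(num2, resto, resultado+1)
--
-- num1 = 120
--
-- num2 = 156
-- ===== SOURCE B (Python) =====
-- def euclides(num1, num2, resultado=1):
--     a, b = (num1, num2) if num1 >= num2 else (num2, num1)
--     count = resultado
--     while True:
--         r = a % b
--         if r == 0: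
--             return (b, count)
--         a, b = b, r
--         count += 1
-- ===== Notes on version B (the rewrite author's own statement) =====
-- stated objective: idiomatic
-- what changed: Replaced the recursion that threads the step counter through its third parameter by an iterative while loop: the pair is normalized once up front (a>=b) and a local count is incremented in place, relying on the invariant that each remainder is smaller than its divisor so no further swaps are needed.
import Mathlib
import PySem

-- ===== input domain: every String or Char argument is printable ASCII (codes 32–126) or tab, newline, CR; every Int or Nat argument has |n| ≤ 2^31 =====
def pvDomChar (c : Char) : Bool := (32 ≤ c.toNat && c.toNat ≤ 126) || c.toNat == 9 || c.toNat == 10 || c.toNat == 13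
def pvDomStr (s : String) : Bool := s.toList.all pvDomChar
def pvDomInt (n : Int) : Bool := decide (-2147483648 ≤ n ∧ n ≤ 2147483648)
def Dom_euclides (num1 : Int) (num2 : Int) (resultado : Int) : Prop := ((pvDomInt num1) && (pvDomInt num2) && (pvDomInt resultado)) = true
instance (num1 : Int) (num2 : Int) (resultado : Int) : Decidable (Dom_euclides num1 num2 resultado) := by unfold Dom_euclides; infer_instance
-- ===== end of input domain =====

-- B replaces A's counter-threading recursion by a single up-front normalization and an
-- iterative while loop with a local count (idiomatic; same cost).

-- ===== PORT A =====
-- fuel-guarded transliteration of A's recursion (the fuel only makes it total; it is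
-- ample on every input admitted by Pre_euclides)
def euclidesRec : Nat → Int → Int → Int → Int × Int
  | 0, _, _, _ => (0, 0)
  | f + 1, num1, num2, resultado =>
    -- if num1 < num2: num1, num2 = num2, num1
    let a := if num1 < num2 then num2 else num1
    let b := if num1 < num2 then num1 else num2
    let resto := PySem.Int.mod a b
    if resto = 0 then (b, resultado)
    else euclidesRec f b resto (resultado + 1)

def euclides (num1 : Int) (num2 : Int) (resultado : Int) : Int × Int :=
  euclidesRec (num1.natAbs + num2.natAbs + 1) num1 num2 resultado

-- ===== PORT B =====
-- the while loop of Source B, fuel-guarded for totality (ample fuel inside Pre_euclides)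
def euclidesLoop : Nat → Int → Int → Int → Int × Int
  | 0, _, _, _ => (0, 0)
  | f + 1, a, b, count =>
    let r := PySem.Int.mod a b
    if r = 0 then (b, count)
    else euclidesLoop f b r (count + 1)

def euclides_alt (num1 : Int) (num2 : Int) (resultado : Int) : Int × Int :=
  -- a, b = (num1, num2) if num1 >= num2 else (num2, num1)
  let a := if num1 ≥ num2 then num1 else num2
  let b := if num1 ≥ num2 then num2 else num1
  euclidesLoop (b.natAbs + 1) a b resultado

-- ===== PRECONDITION & SPEC =====
-- Pre_ is exactly where the Python A returns: with both arguments ≥ 1 the recursion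
-- terminates normally; with min < 0 it returns (in one step) iff min divides max;
-- on all remaining inputs A raises (ZeroDivisionError when min = 0, RecursionError
-- when min < 0 and min does not divide max).
def Pre_euclides (num1 : Int) (num2 : Int) (resultado : Int) : Prop :=
  (1 ≤ num1 ∧ 1 ≤ num2) ∨ (min num1 num2 < 0 ∧ min num1 num2 ∣ max num1 num2)
instance (num1 : Int) (num2 : Int) (resultado : Int) : Decidable (Pre_euclides num1 num2 resultado) := by unfold Pre_euclides; infer_instance
def pvWitness_euclides : Int × Int × Int := (120, 156, 1)

def Spec_euclides (num1 : Int) (num2 : Int) (resultado : Int) (out : Int × Int) : Prop := out = euclides_alt num1 num2 resultado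
instance (num1 : Int) (num2 : Int) (resultado : Int) (out : Int × Int) : Decidable (Spec_euclides num1 num2 resultado out) := by unfold Spec_euclides; infer_instance

-- ===== CLAIM (what is proved, stated in full; the proofs are below) =====
def Claim_equal_euclides : Prop := ∀ (num1 : Int) (num2 : Int) (resultado : Int), Dom_euclides num1 num2 resultado → Pre_euclides num1 num2 resultado → Spec_euclides num1 num2 resultado (euclides num1 num2 resultado)

-- ===== LEMMAS AND PROOFS =====

-- once the divisor is positive and no larger than the dividend, A's recursion and B's
-- loop perform the same division steps (A's per-step swap is a no-op)
lemma rec_eq_loop : ∀ (f1 f2 : Nat) (a b c : Int), 1 ≤ b → b ≤ a →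
    b.natAbs < f1 → b.natAbs < f2 → euclidesRec f1 a b c = euclidesLoop f2 a b c := by
  intro f1
  induction f1 with
  | zero => intro f2 a b c _ _ h1 _; omega
  | succ f ih =>
    intro f2 a b c hb hba h1 h2
    match f2 with
    | 0 => omega
    | g + 1 =>
      have hns : ¬ a < b := by omega
      simp only [euclidesRec, euclidesLoop, hns, if_false]
      have hmod : PySem.Int.mod a b = a % b := PySem.Int.mod_eq_emod_of_pos (by omega)
      by_cases hr : PySem.Int.mod a b = 0
      · simp [hr]
      · simp only [hr, if_false]
        have h0 : 0 ≤ a % b := Int.emod_nonneg a (by omega)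
        have hlt : a % b < b := Int.emod_lt_of_pos a (by omega)
        apply ih
        · omega
        · omega
        · rw [hmod]; omega
        · rw [hmod]; omega

-- swapping the arguments does not change A's recursion (it normalizes the pair itself)
lemma rec_swap (f : Nat) (a b c : Int) (h : a < b) :
    euclidesRec (f + 1) a b c = euclidesRec (f + 1) b a c := by
  have h2 : ¬ b < a := by omega
  simp only [euclidesRec, h, h2, if_true, if_false]

-- ===== VERDICT =====
theorem euclides_spec : Claim_equal_euclides := by
  intro num1 num2 resultado _ hpre
  unfold Spec_euclides euclides euclides_alt
  rcases hpre with ⟨h1, h2⟩ | ⟨hneg, hdvd⟩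
  · by_cases hlt : num1 < num2
    · have hge : ¬ num1 ≥ num2 := by omega
      simp only [hge, if_false]
      rw [rec_swap _ _ _ _ hlt]
      exact rec_eq_loop _ _ _ _ _ h1 (by omega) (by omega) (by omega)
    · have hge : num1 ≥ num2 := by omega
      simp only [hge, if_true]
      exact rec_eq_loop _ _ _ _ _ h2 (by omega) (by omega) (by omega)
  · -- min < 0 and min ∣ max: both sides return (min, resultado) in one step
    by_cases hlt : num1 < num2
    · have hm : min num1 num2 = num1 := by omega
      have hM : max num1 num2 = num2 := by omega
      rw [hm] at hneg; rw [hm, hM] at hdvd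
      have hge : ¬ num1 ≥ num2 := by omega
      have hr : PySem.Int.mod num2 num1 = 0 := (PySem.Int.mod_eq_zero_iff_dvd num2 num1).mpr hdvd
      simp only [euclidesRec, euclidesLoop, hge, hlt, if_true, if_false, hr]
    · have hm : min num1 num2 = num2 := by omega
      have hM : max num1 num2 = num1 := by omega
      rw [hm] at hneg; rw [hm, hM] at hdvd
      have hge : num1 ≥ num2 := by omega
      have hr : PySem.Int.mod num1 num2 = 0 := (PySem.Int.mod_eq_zero_iff_dvd num1 num2).mpr hdvd
      simp only [euclidesRec, euclidesLoop, hge, hlt, if_true, if_false, hr]
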